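-- pv_equiv track=rewrite | github.com/Minerstove/Python | Lab5/Lab5b.py | movie_count
-- ===== SOURCE A (Python) =====
-- def movie_count(mins,cost,b1,b2):
--     result = 0
--     for minute in mins:
--         for actor in cost:
--             total = minute*60*actor
--             if b1 <= total <= b2:
--                 result += 1
--
--     return result
-- ===== SOURCE B (Python) =====
-- def _bisect_left(s, x):
--     lo, hi = 0, len(s)
--     while lo < hi:
--         mid = (lo + hi) // 2
--         if s[mid] < x:
--             lo = mid + 1
--         else:
--             hi = mid
--     return lo
--
-- def _bisect_right(s, x):
--     lo, hi = 0, len(s)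
--     while lo < hi:
--         mid = (lo + hi) // 2
--         if x < s[mid]:
--             hi = mid
--         else:
--             lo = mid + 1
--     return lo
--
-- def movie_count(mins, cost, b1, b2):
--     s = sorted(cost)
--     n = len(s)
--     result = 0
--     for minute in mins:
--         k = minute * 60
--         if k == 0:
--             if b1 <= 0 <= b2:
--                 result += n
--         else:
--             if k > 0:
--                 lob, hib, kk = b1, b2, k
--             else:
--                 lob, hib, kk = -b2, -b1, -k
--             lo = -((-lob) // kk)
--             hi = hib // kk
--             if lo <= hi:
--                 result += _bisect_right(s, hi) - _bisect_left(s, lo)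
--     return result
-- ===== Notes on version B (the rewrite author's own statement) =====
-- stated objective: faster
-- what changed: Instead of testing every (minute, actor) pair, B sorts cost once and for each minute derives the exact actor interval [lo, hi] by floor/ceiling division (after sign normalisation of minute*60), then counts it with two hand-written binary searches.
import Mathlib
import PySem

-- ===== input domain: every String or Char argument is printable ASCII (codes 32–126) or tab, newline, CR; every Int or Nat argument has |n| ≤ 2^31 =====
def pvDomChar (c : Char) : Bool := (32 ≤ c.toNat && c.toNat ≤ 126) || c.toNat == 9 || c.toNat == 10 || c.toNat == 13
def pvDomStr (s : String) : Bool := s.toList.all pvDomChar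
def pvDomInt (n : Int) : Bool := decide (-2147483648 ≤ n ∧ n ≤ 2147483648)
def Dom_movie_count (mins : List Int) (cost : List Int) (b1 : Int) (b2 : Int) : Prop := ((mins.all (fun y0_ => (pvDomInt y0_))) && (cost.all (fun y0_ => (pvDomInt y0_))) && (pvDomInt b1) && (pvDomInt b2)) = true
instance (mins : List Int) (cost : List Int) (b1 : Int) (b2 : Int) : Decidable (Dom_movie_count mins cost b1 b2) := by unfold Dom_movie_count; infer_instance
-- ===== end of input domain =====

-- B sorts cost once and, per minute, counts the valid actor interval with two binary
-- searches instead of scanning all pairs (objective: faster, O((n+m) log m) vs O(n*m)).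

-- ===== PORT A =====
def movie_count (mins : List Int) (cost : List Int) (b1 : Int) (b2 : Int) : Int :=
  mins.foldl (fun result minute =>
    cost.foldl (fun result actor =>
      let total := minute * 60 * actor
      if b1 ≤ total ∧ total ≤ b2 then result + 1 else result) result) 0

-- ===== PORT B =====
-- _bisect_left / _bisect_right in Source B are character-for-character the CPython bisect
-- loops, which PySem transcribes as PySem.List.bisectLeft / bisectRight.
def movie_count_alt (mins : List Int) (cost : List Int) (b1 : Int) (b2 : Int) : Int :=
  let s := PySem.List.sorted cost (fun x => x) false
  let n := s.length
  mins.foldl (fun result minute =>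
    let k := minute * 60
    if k = 0 then
      if b1 ≤ 0 ∧ (0 : Int) ≤ b2 then result + (n : Int) else result
    else
      let lob := if 0 < k then b1 else -b2
      let hib := if 0 < k then b2 else -b1
      let kk  := if 0 < k then k else -k
      let lo := -(PySem.Int.floordiv (-lob) kk)
      let hi := PySem.Int.floordiv hib kk
      if lo ≤ hi then
        result + ((PySem.List.bisectRight s hi : Int) - (PySem.List.bisectLeft s lo : Int))
      else result) 0

-- ===== PRECONDITION & SPEC =====
def Spec_movie_count (mins : List Int) (cost : List Int) (b1 : Int) (b2 : Int) (out : Int) : Prop := out = movie_count_alt mins cost b1 b2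
instance (mins : List Int) (cost : List Int) (b1 : Int) (b2 : Int) (out : Int) : Decidable (Spec_movie_count mins cost b1 b2 out) := by unfold Spec_movie_count; infer_instance

-- ===== CLAIM (what is proved, stated in full; the proofs are below) =====
def Claim_equal_movie_count : Prop := ∀ (mins : List Int) (cost : List Int) (b1 : Int) (b2 : Int), Dom_movie_count mins cost b1 b2 → Spec_movie_count mins cost b1 b2 (movie_count mins cost b1 b2)

-- ===== LEMMAS AND PROOFS =====

-- countP of a predicate that holds exactly on the first n0 positions is n0.
lemma pvCountSplit : ∀ (s : List Int) (p : Int → Bool) (n0 : Nat), n0 ≤ s.length →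
    (∀ j (hj : j < s.length), j < n0 → p s[j] = true) →
    (∀ j (hj : j < s.length), n0 ≤ j → p s[j] = false) →
    s.countP p = n0 := by
  intro s
  induction s with
  | nil => intro p n0 h _ _; simp at h; simp [h]
  | cons a t ih =>
    intro p n0 hle h1 h2
    match n0 with
    | 0 =>
      have ha : p a = false := h2 0 (by simp) (by omega)
      simp only [List.countP_cons, ha, Bool.false_eq_true, if_false, Nat.add_zero]
      apply List.countP_eq_zero.mpr
      intro x hx
      obtain ⟨j, hj, rfl⟩ := List.mem_iff_getElem.mp hx
      have := h2 (j + 1) (by simpa using Nat.succ_lt_succ hj) (by omega)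
      simpa using this
    | m + 1 =>
      have ha : p a = true := by simpa using h1 0 (by simp) (by omega)
      simp only [List.countP_cons, ha, if_true]
      have : t.countP p = m := by
        apply ih p m (by simpa using Nat.le_of_succ_le_succ hle)
        · intro j hj hjm
          simpa using h1 (j + 1) (by simpa using Nat.succ_lt_succ hj) (by omega)
        · intro j hj hjm
          simpa using h2 (j + 1) (by simpa using Nat.succ_lt_succ hj) (by omega)
      omega

lemma pvBisectLeft_count (s : List Int) (x : Int)
    (hs : List.Pairwise (fun a b => a ≤ b) s) :
    s.countP (fun a => decide (a < x)) = PySem.List.bisectLeft s x := by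
  obtain ⟨hlen, h1, h2⟩ := PySem.List.bisectLeft_spec s x hs
  exact pvCountSplit s _ _ hlen
    (fun j hj hjn => by simpa using h1 j hj hjn)
    (fun j hj hjn => by simpa using not_lt.mpr (h2 j hj hjn))

lemma pvBisectRight_count (s : List Int) (x : Int)
    (hs : List.Pairwise (fun a b => a ≤ b) s) :
    s.countP (fun a => decide (a ≤ x)) = PySem.List.bisectRight s x := by
  obtain ⟨hlen, h1, h2⟩ := PySem.List.bisectRight_spec s x hs
  exact pvCountSplit s _ _ hlen
    (fun j hj hjn => by simpa using h1 j hj hjn)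
    (fun j hj hjn => by simpa using not_le.mpr (h2 j hj hjn))

lemma pvCountAdd (lo hi : Int) (h : lo ≤ hi) (l : List Int) :
    l.countP (fun a => decide (a ≤ hi)) =
      l.countP (fun a => decide (a < lo)) + l.countP (fun a => decide (lo ≤ a ∧ a ≤ hi)) := by
  induction l with
  | nil => simp
  | cons a t ih =>
    simp only [List.countP_cons, ih]
    split_ifs with h1 h2 h3 <;> simp only [decide_eq_true_eq] at * <;> omega

-- the per-minute interval characterisation: b1 ≤ k*a ≤ b2 ↔ lo ≤ a ≤ hi
lemma pvIntervalIff (b1 b2 k a : Int) (hk : k ≠ 0) :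
    (b1 ≤ k * a ∧ k * a ≤ b2) ↔
      (-(PySem.Int.floordiv (-(if 0 < k then b1 else -b2)) (if 0 < k then k else -k)) ≤ a ∧
        a ≤ PySem.Int.floordiv (if 0 < k then b2 else -b1) (if 0 < k then k else -k)) := by
  by_cases hk0 : 0 < k
  · simp only [hk0, if_true]
    constructor
    · rintro ⟨hL, hR⟩
      refine ⟨?_, ?_⟩
      · rw [neg_le, PySem.Int.le_floordiv_iff_mul_le hk0]; nlinarith
      · by_contra hc
        have := (PySem.Int.floordiv_lt_iff_lt_mul hk0).mp (not_le.mp hc)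
        nlinarith
    · rintro ⟨hL, hR⟩
      have hL' : -a * k ≤ -b1 := (PySem.Int.le_floordiv_iff_mul_le hk0).mp (neg_le.mpr hL)
      have hR' : ¬ (b2 < a * k) := fun hc =>
        absurd ((PySem.Int.floordiv_lt_iff_lt_mul hk0).mpr hc) (not_lt.mpr hR)
      constructor <;> nlinarith [not_lt.mp hR']
  · have hkn : 0 < -k := by omega
    simp only [hk0, if_false]
    constructor
    · rintro ⟨hL, hR⟩
      refine ⟨?_, ?_⟩
      · rw [neg_le, PySem.Int.le_floordiv_iff_mul_le hkn]; nlinarith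
      · by_contra hc
        have := (PySem.Int.floordiv_lt_iff_lt_mul hkn).mp (not_le.mp hc)
        nlinarith
    · rintro ⟨hL, hR⟩
      have hL' : -a * -k ≤ -(-b2) := (PySem.Int.le_floordiv_iff_mul_le hkn).mp (neg_le.mpr hL)
      have hR' : ¬ (-b1 < a * -k) := fun hc =>
        absurd ((PySem.Int.floordiv_lt_iff_lt_mul hkn).mpr hc) (not_lt.mpr hR)
      constructor <;> nlinarith [not_lt.mp hR']

-- A's inner loop over cost equals B's per-minute contribution.
lemma pvPerMinute (cost : List Int) (b1 b2 minute result : Int) :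
    cost.foldl (fun result actor =>
        let total := minute * 60 * actor
        if b1 ≤ total ∧ total ≤ b2 then result + 1 else result) result =
      (let s := PySem.List.sorted cost (fun x => x) false
       let n := s.length
       let k := minute * 60
       if k = 0 then
         if b1 ≤ 0 ∧ (0 : Int) ≤ b2 then result + (n : Int) else result
       else
         let lob := if 0 < k then b1 else -b2
         let hib := if 0 < k then b2 else -b1
         let kk  := if 0 < k then k else -k
         let lo := -(PySem.Int.floordiv (-lob) kk)
         let hi := PySem.Int.floordiv hib kk
         if lo ≤ hi then
           result + ((PySem.List.bisectRight s hi : Int) - (PySem.List.bisectLeft s lo : Int))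
         else result) := by
  have hA : cost.foldl (fun result actor =>
        let total := minute * 60 * actor
        if b1 ≤ total ∧ total ≤ b2 then result + 1 else result) result =
      result + (cost.countP (fun a => decide (b1 ≤ minute * 60 * a ∧ minute * 60 * a ≤ b2)) : Int) :=
    PySem.List.foldl_ite_add_one (fun a => b1 ≤ minute * 60 * a ∧ minute * 60 * a ≤ b2) cost result
  rw [hA]
  set k := minute * 60 with hk
  have hsp : List.Pairwise (fun a b : Int => a ≤ b) (PySem.List.sorted cost (fun x => x) false) := by
    simpa using PySem.List.sorted_pairwise cost (fun x => x)
  have hperm : (PySem.List.sorted cost (fun x => x) false).Perm cost :=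
    PySem.List.sorted_perm cost (fun x => x) false
  by_cases hk0 : k = 0
  · simp only [hk0, if_true]
    have hc : cost.countP (fun a => decide (b1 ≤ k * a ∧ k * a ≤ b2)) =
        cost.countP (fun _ => decide (b1 ≤ 0 ∧ (0 : Int) ≤ b2)) := by
      apply List.countP_congr
      intro x _
      simp [hk0]
    rw [hk0] at hc
    by_cases hcond : b1 ≤ 0 ∧ (0 : Int) ≤ b2
    · simp only [hcond]
      rw [hc]
      simp [hcond, PySem.List.length_sorted]
    · simp only [hcond, if_false]
      rw [hc]
      simp [hcond]
  · simp only [hk0, if_false]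
    set lob := if 0 < k then b1 else -b2 with hlob
    set hib := if 0 < k then b2 else -b1 with hhib
    set kk  := if 0 < k then k else -k with hkk
    set lo := -(PySem.Int.floordiv (-lob) kk) with hlo
    set hi := PySem.Int.floordiv hib kk with hhi
    have hiff : ∀ a : Int, (b1 ≤ k * a ∧ k * a ≤ b2) ↔ (lo ≤ a ∧ a ≤ hi) := by
      intro a
      rw [hlo, hhi, hlob, hhib, hkk]
      exact pvIntervalIff b1 b2 k a hk0
    have hcnt : cost.countP (fun a => decide (b1 ≤ k * a ∧ k * a ≤ b2)) =
        cost.countP (fun a => decide (lo ≤ a ∧ a ≤ hi)) := by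
      apply List.countP_congr
      intro x _
      simpa using hiff x
    rw [hcnt]
    by_cases hle : lo ≤ hi
    · simp only [hle, if_true]
      have hsplit := pvCountAdd lo hi hle (PySem.List.sorted cost (fun x => x) false)
      have hbl := pvBisectLeft_count (PySem.List.sorted cost (fun x => x) false) lo hsp
      have hbr := pvBisectRight_count (PySem.List.sorted cost (fun x => x) false) hi hsp
      have hpc : cost.countP (fun a => decide (lo ≤ a ∧ a ≤ hi)) =
          (PySem.List.sorted cost (fun x => x) false).countP (fun a => decide (lo ≤ a ∧ a ≤ hi)) :=
        (hperm.countP_eq _).symm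
      rw [hpc]
      rw [hbl, hbr] at hsplit
      omega
    · simp only [hle, if_false]
      have : cost.countP (fun a => decide (lo ≤ a ∧ a ≤ hi)) = 0 := by
        apply List.countP_eq_zero.mpr
        intro x _
        simp only [decide_eq_true_eq]
        omega
      rw [this]
      simp

-- ===== VERDICT (by name: the statement is the Claim_ definition above) =====
theorem movie_count_spec : Claim_equal_movie_count := by
  intro mins cost b1 b2 _hdom
  unfold Spec_movie_count movie_count movie_count_alt
  apply PySem.List.foldl_congr_mem
  intro acc minute _hm
  exact pvPerMinute cost b1 b2 minute acc
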